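-- pv_equiv track=rewrite | github.com/jhorne98/CryptoTools | patternmatcher/mpat.py | makePattern
-- ===== SOURCE A (Python) =====
-- import string
--
-- def makePattern(word):
-- 	az = string.ascii_lowercase
-- 	pattern = ''
--
-- 	for i in range(0, len(word)):
-- 		for j in range(0, i):
-- 			if word[j] == word[i]:
-- 				pattern += pattern[j]
-- 				break
--
-- 		if len(pattern) < i + 1:
-- 			pattern += az[0]
-- 			az = az[1:]
--
-- 	return pattern
-- ===== SOURCE B (Python) =====
-- import string
--
-- def makePattern(word):
--     unique = list(dict.fromkeys(word))
--     mapping = {c: string.ascii_lowercase[i] for i, c in enumerate(unique)}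
--     return ''.join(mapping[c] for c in word)
-- ===== Notes on version B (the rewrite author's own statement) =====
-- stated objective: faster
-- what changed: A's per-character nested backward scan with incremental alphabet slicing is replaced by a two-pass translate: collect distinct characters once with dict.fromkeys, build a char-to-letter table, then map the word through it.
import Mathlib
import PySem

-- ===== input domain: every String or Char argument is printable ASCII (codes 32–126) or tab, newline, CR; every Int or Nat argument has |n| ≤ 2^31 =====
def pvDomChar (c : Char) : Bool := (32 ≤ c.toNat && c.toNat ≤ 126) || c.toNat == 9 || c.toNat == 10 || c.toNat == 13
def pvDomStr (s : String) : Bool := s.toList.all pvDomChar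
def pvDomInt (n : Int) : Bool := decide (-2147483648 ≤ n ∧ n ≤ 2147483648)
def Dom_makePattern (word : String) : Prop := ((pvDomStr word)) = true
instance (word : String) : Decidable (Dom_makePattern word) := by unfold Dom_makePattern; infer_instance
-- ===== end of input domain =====

-- B replaces A's nested index scans by a two-pass table build (distinct chars once, then translate);
-- objective: idiomatic. Both Pythons raise IndexError past 26 distinct chars (excluded by Pre_).

-- ===== PORT A =====
-- string.ascii_lowercase
def azInit : List Char := "abcdefghijklmnopqrstuvwxyz".toList

-- one iteration of A's outer for-loop; state = (az, pattern).
-- the inner 'for j ... break' is the first j < i with word[j] == word[i], i.e. find? over range i;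
-- pattern[j] is always in range there; az[0] raises IndexError on empty az (Python) — pyGetD is
-- exact under Pre_, which rules that case out.
def aStep (w : List Char) (st : List Char × List Char) (i : Nat) : List Char × List Char :=
  let pat :=
    match (List.range i).find? (fun (j : Nat) => PySem.List.pyGet? w (j : Int) == PySem.List.pyGet? w (i : Int)) with
    | some j => st.2 ++ [PySem.List.pyGetD st.2 (j : Int) ' ']
    | none => st.2
  if pat.length < i + 1 then
    (PySem.List.slice st.1 (some 1) none, pat ++ [PySem.List.pyGetD st.1 0 ' '])
  else (st.1, pat)

def makePattern (word : String) : String :=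
  String.mk ((List.range word.toList.length).foldl (aStep word.toList) (azInit, [])).2

-- ===== PORT B =====
-- {c: ascii_lowercase[i] for i, c in enumerate(unique)} with unique = list(dict.fromkeys(word));
-- ascii_lowercase[i] raises IndexError past 26 distinct chars (excluded by Pre_), so pyGetD is exact.
def bMapping (w : List Char) : PySem.Dict Char Char :=
  (PySem.List.enumerate (PySem.List.dedup w)).foldl
    (fun d p => d.insert p.2 (PySem.List.pyGetD azInit p.1 ' ')) PySem.Dict.empty

def makePattern_alt (word : String) : String :=
  String.mk (word.toList.map (fun c => (bMapping word.toList).getD c ' '))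

-- ===== PRECONDITION & SPEC =====
-- Python A (and B) raises IndexError when the word has more than 26 distinct characters
-- (ascii_lowercase is exhausted); Pre_ excludes exactly those inputs.
def Pre_makePattern (word : String) : Prop := (PySem.List.dedup word.toList).length ≤ 26
instance (word : String) : Decidable (Pre_makePattern word) := by unfold Pre_makePattern; infer_instance
def pvWitness_makePattern : String := "hello"
def Spec_makePattern (word : String) (out : String) : Prop := out = makePattern_alt word
instance (word : String) (out : String) : Decidable (Spec_makePattern word out) := by unfold Spec_makePattern; infer_instance

-- ===== CLAIM (what is proved, stated in full; the proofs are below) =====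
def Claim_equal_makePattern : Prop := ∀ (word : String), Dom_makePattern word → Pre_makePattern word → Spec_makePattern word (makePattern word)

-- ===== LEMMAS AND PROOFS =====

-- the canonical letter of c: the alphabet letter at c's first-occurrence rank in the whole word
def gLet (w : List Char) (c : Char) : Char :=
  azInit.getD ((PySem.List.dedup w).idxOf c) ' '

-- -- B-side: the built dict maps each distinct char to its alphabet letter --

theorem bMapping_get? (u : List Char) (s : Nat) (d0 : PySem.Dict Char Char) (c : Char)
    (hnd : u.Nodup) :
    ((PySem.List.enumerate u (s : Int)).foldl
      (fun d p => d.insert p.2 (PySem.List.pyGetD azInit p.1 ' ')) d0).get? c =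
    if c ∈ u then some (azInit.getD (s + u.idxOf c) ' ') else d0.get? c := by
  induction u generalizing s d0 with
  | nil => simp [PySem.List.enumerate_nil]
  | cons x u ih =>
    rw [PySem.List.enumerate_cons, List.foldl_cons]
    have hx : x ∉ u := (List.nodup_cons.mp hnd).1
    have hnd' := (List.nodup_cons.mp hnd).2
    have hcast : ((s : Int) + 1) = ((s + 1 : Nat) : Int) := by push_cast; ring
    rw [hcast, ih (s + 1) _ hnd']
    by_cases hcu : c ∈ u
    · have hcx : c ≠ x := fun h => hx (h ▸ hcu)
      rw [if_pos hcu, if_pos (List.mem_cons_of_mem _ hcu)]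
      rw [List.idxOf_cons_ne _ (by simpa using (Ne.symm hcx))]
      congr 2
      omega
    · rw [if_neg hcu]
      by_cases hcx : c = x
      · subst hcx
        rw [PySem.Dict.get?_insert_self, if_pos (List.mem_cons_self)]
        simp [List.idxOf_cons_self]
      · rw [PySem.Dict.get?_insert_of_ne _ _ hcx]
        rw [if_neg (by simp [hcx, hcu])]

theorem bMapping_getD (w : List Char) (c : Char) (hc : c ∈ w) :
    (bMapping w).getD c ' ' = gLet w c := by
  unfold bMapping gLet
  rw [PySem.Dict.getD_eq_get?_getD]
  rw [show (0 : Int) = ((0 : Nat) : Int) from rfl,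
    bMapping_get? _ 0 _ c (PySem.List.nodup_dedup w),
    if_pos ((PySem.List.mem_dedup _ _).mpr hc)]
  simp

theorem alt_eq_map (word : String) :
    makePattern_alt word = String.mk (word.toList.map (gLet word.toList)) := by
  unfold makePattern_alt
  congr 1
  exact List.map_congr_left fun c hc => bMapping_getD _ c hc

-- -- A-side: the loop invariant --

theorem dedup_snoc (l : List Char) (c : Char) :
    PySem.List.dedup (l ++ [c]) =
      if c ∈ PySem.List.dedup l then PySem.List.dedup l else PySem.List.dedup l ++ [c] := by
  simp only [PySem.List.dedup_eq_ofList, PySem.Set.ofList_eq_foldl, List.foldl_append,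
    List.foldl_cons, List.foldl_nil]
  simp [PySem.Set.add, PySem.Set.contains]

theorem dedup_prefix (l t : List Char) :
    PySem.List.dedup l <+: PySem.List.dedup (l ++ t) := by
  induction t generalizing l with
  | nil => simp
  | cons x t ih =>
    have h1 : PySem.List.dedup l <+: PySem.List.dedup (l ++ [x]) := by
      rw [dedup_snoc]
      split_ifs
      · exact List.prefix_refl _
      · exact ⟨[x], rfl⟩
    have h2 := ih (l ++ [x])
    have he : l ++ x :: t = (l ++ [x]) ++ t := by simp
    rw [he]
    exact h1.trans h2

theorem idxOf_of_prefix {l₁ l₂ : List Char} (h : l₁ <+: l₂) {c : Char} (hc : c ∈ l₁) :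
    l₂.idxOf c = l₁.idxOf c := by
  obtain ⟨t, rfl⟩ := h
  exact List.idxOf_append_of_mem hc

theorem find?_range_none (n : Nat) (p : Nat → Bool) (h : ∀ j < n, p j = false) :
    (List.range n).find? p = none := by
  rw [List.find?_eq_none]
  intro j hj
  simp [h j (List.mem_range.mp hj)]

theorem find?_range_first (n j0 : Nat) (p : Nat → Bool) (hj : j0 < n) (hp : p j0 = true)
    (hmin : ∀ j < j0, p j = false) : (List.range n).find? p = some j0 := by
  induction n with
  | zero => omega
  | succ m ih =>
    rw [List.range_succ, List.find?_append]
    rcases Nat.lt_or_ge j0 m with h | h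
    · rw [ih h]; rfl
    · have hj0 : j0 = m := by omega
      subst hj0
      rw [find?_range_none _ p hmin]
      simp [hp]

theorem aLoop (w : List Char) (i : Nat) (hi : i ≤ w.length) :
    (List.range i).foldl (aStep w) (azInit, []) =
      (azInit.drop (PySem.List.dedup (w.take i)).length, (w.take i).map (gLet w)) := by
  induction i with
  | zero => simp [PySem.List.dedup_eq_ofList, PySem.Set.ofList]
  | succ i ih =>
    have hi' : i ≤ w.length := by omega
    have hil : i < w.length := by omega
    rw [List.range_succ, List.foldl_append, List.foldl_cons, List.foldl_nil, ih hi']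
    have htake : w.take (i + 1) = w.take i ++ [w[i]] := by
      rw [List.take_succ]
      simp [List.getElem?_eq_getElem hil]
    have hlenP : ((w.take i).map (gLet w)).length = i := by
      simp [List.length_take, Nat.min_eq_left hi']
    have hget : ∀ (j : Nat) (hj : j < w.length),
        ((fun j : Nat => PySem.List.pyGet? w (j : Int) == PySem.List.pyGet? w ((i : Nat) : Int)) j = true)
          ↔ w[j]'hj = w[i] := by
      intro j hj
      simp [PySem.List.pyGet?_natCast, List.getElem?_eq_getElem hj, List.getElem?_eq_getElem hil]
    unfold aStep
    by_cases hcm : w[i] ∈ w.take i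
    · -- repeated character: the inner scan hits its first earlier occurrence
      have hlt : (w.take i).idxOf w[i] < i := by
        have := List.idxOf_lt_length_of_mem hcm
        simpa [List.length_take, Nat.min_eq_left hi'] using this
      have hgetj : (w.take i)[((w.take i).idxOf w[i])]'(by rwa [List.length_take, Nat.min_eq_left hi']) = w[i] :=
        List.getElem_idxOf _
      rw [find?_range_first i ((w.take i).idxOf w[i]) _ hlt
        (by
          rw [hget _ (by omega)]
          rw [List.getElem_take] at hgetj
          exact hgetj)
        (by
          intro j hjlt
          rw [Bool.eq_false_iff, Ne, hget _ (by omega)]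
          intro he
          have hne : (w.take i)[j]'(by rw [List.length_take, Nat.min_eq_left hi']; omega) ≠ w[i] := by
            have := List.not_of_lt_findIdx (p := (· == w[i])) (xs := w.take i)
              (i := j) (by simpa [List.idxOf] using hjlt)
            simpa using this
          rw [List.getElem_take] at hne
          exact hne he)]
      simp only
      have hpatval : PySem.List.pyGetD ((w.take i).map (gLet w)) (((w.take i).idxOf w[i] : Nat) : Int) ' '
          = gLet w w[i] := by
        rw [PySem.List.pyGetD_natCast]
        rw [List.getD_eq_getElem _ _ (by rw [List.length_map]; rwa [List.length_take, Nat.min_eq_left hi'])]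
        rw [List.getElem_map]
        rw [hgetj]
      rw [hpatval]
      rw [if_neg (by rw [List.length_append, hlenP]; simp)]
      rw [htake, dedup_snoc, if_pos ((PySem.List.mem_dedup _ _).mpr hcm)]
      simp
      rw [List.take_succ, List.getElem?_map, List.getElem?_eq_getElem hil]
      simp
    · -- first occurrence: the inner scan finds nothing, a fresh letter is taken
      rw [find?_range_none i _ (by
        intro j hjlt
        rw [Bool.eq_false_iff, Ne, hget _ (by omega)]
        intro he
        exact hcm (by
          rw [← he]
          exact List.mem_take_iff_getElem.mpr ⟨j, by omega, rfl⟩))]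
      simp only
      rw [if_pos (by simp)]
      have hnm : w[i] ∉ PySem.List.dedup (w.take i) := fun h => hcm ((PySem.List.mem_dedup _ _).mp h)
      have hdd : PySem.List.dedup (w.take (i + 1)) = PySem.List.dedup (w.take i) ++ [w[i]] := by
        rw [htake, dedup_snoc, if_neg hnm]
      have hidx : (PySem.List.dedup w).idxOf w[i] = (PySem.List.dedup (w.take i)).length := by
        have hpre : PySem.List.dedup (w.take (i + 1)) <+: PySem.List.dedup w := by
          conv_rhs => rw [← List.take_append_drop (i + 1) w]
          exact dedup_prefix _ _
        have hmemc : w[i] ∈ PySem.List.dedup (w.take (i + 1)) := by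
          rw [hdd]
          exact List.mem_append_right _ (List.mem_singleton.mpr rfl)
        rw [idxOf_of_prefix hpre hmemc, hdd, List.idxOf_append, if_neg hnm]
        simp
      have hval : PySem.List.pyGetD (azInit.drop (PySem.List.dedup (w.take i)).length) 0 ' '
          = gLet w w[i] := by
        rw [show (0 : Int) = ((0 : Nat) : Int) from rfl, PySem.List.pyGetD_natCast]
        unfold gLet
        rw [hidx]
        simp [List.getD, List.getElem?_drop]
      rw [hval, PySem.List.slice_from_one, htake, dedup_snoc, if_neg hnm]
      simp
      rw [List.take_succ, List.getElem?_map, List.getElem?_eq_getElem hil]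
      simp

-- ===== VERDICT (by name: the statement is the Claim_ definition above) =====
theorem makePattern_spec : Claim_equal_makePattern := by
  intro word _ _
  unfold Spec_makePattern makePattern
  rw [aLoop word.toList word.toList.length le_rfl, alt_eq_map]
  rw [List.take_length]
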